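-- pv_equiv track=rewrite | github.com/deekshitakacham/6.009-Lab-6 | lab.py | rule_three
-- ===== SOURCE A (Python) =====
-- def group_combinations(students, group):
--     """
--     Given students, which is a dictionary of the students, and
--     the size of their group, returns the combinations of
--     the students of that group size
--     """
--
--     if group == 1:
--         result1 = []
--         for student in students:
--             result1.append([student])
--         return result1
--
--     else:
--         result2 = []
--         for i in range(len(students)):
--             smaller_list = students[i+1:]
--             for left_over in group_combinations(smaller_list, group-1):
--                 result2.append([students[i]]+left_over)
--
--         return result2
--
-- def rule_three(student_preferences, room_capacities):
--     """
--     Implements the third rule, which, given student_preferences and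
--     room_capacities, guarantees that for each room that contains N
--     students, there is one student who is not in the room.
--     """
--     result = []
--     dict_list = room_capacities.items()
--     students = student_preferences.keys()
--     #names = student_preferences.keys()
--
--     for i in dict_list:
--         if i[1] < len(students):
--             #if greater than number of students, we don't have to worry
--             groups = group_combinations(list(students), i[1]+1)
--
--             for group in groups:
--                 inner = []
--
--                 for person in group:
--
--                     slot = ((person+'_'+i[0], False))
--
--                     inner.append(slot)
--                 result.append(inner)
--
--     return result
-- ===== SOURCE B (Python) =====
-- def rule_three(student_preferences, room_capacities):
--     students = list(student_preferences)
--     result = []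
--     for room, capacity in room_capacities.items():
--         if 0 <= capacity < len(students):
--             # grow combinations level by level: each state is (chosen, remaining candidates)
--             partial = [([], students)]
--             for _ in range(capacity + 1):
--                 new = []
--                 for combo, rest in partial:
--                     while rest:
--                         s, rest = rest[0], rest[1:]
--                         new.append((combo + [s], rest))
--                 partial = new
--             for combo, _ in partial:
--                 result.append([(name + '_' + room, False) for name in combo])
--     return result
-- ===== Notes on version B (the rewrite author's own statement) =====
-- stated objective: alternative
-- what changed: Replaces A's recursive group_combinations helper (choose head, recurse on the suffix, one recursion level per group size) by an iterative breadth-first frontier: capacity+1 rounds, each round extending every partial state (chosen, remaining-candidates) with each remaining candidate; this produces the identical lexicographic order without any recursion.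
import Mathlib
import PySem

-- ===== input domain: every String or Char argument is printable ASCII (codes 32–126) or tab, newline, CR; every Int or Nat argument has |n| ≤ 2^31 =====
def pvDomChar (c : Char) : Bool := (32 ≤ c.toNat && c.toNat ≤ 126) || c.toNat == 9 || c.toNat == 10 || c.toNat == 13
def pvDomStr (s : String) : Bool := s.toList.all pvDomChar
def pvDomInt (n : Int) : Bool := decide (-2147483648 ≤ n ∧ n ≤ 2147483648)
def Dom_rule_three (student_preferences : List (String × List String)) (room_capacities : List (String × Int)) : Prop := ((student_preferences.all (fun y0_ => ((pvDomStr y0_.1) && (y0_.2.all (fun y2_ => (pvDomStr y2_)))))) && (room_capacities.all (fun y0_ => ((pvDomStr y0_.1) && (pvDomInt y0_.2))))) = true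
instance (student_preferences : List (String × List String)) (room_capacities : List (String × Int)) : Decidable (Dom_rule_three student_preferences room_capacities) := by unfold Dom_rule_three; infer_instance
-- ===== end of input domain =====

-- B replaces A's recursive combination generator by an iterative level-by-level pvFrontier expansion (alternative decomposition; same cost).

-- ===== PORT A =====
-- A's index loop 'for i in range(len(students)): smaller_list = students[i+1:] …' is
-- transcribed as the equivalent structural recursion over the suffixes of the list;
-- the 'result.append' loops stay foldl's over an accumulator.
def group_combinations (students : List String) (group : Int) : List (List String) :=
  if group = 1 then
    students.foldl (fun result1 student => result1 ++ [[student]]) []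
  else
    match students with
    | [] => []
    | s :: rest =>
      (group_combinations rest (group - 1)).foldl
        (fun result2 left_over => result2 ++ [s :: left_over]) []
      ++ group_combinations rest group
termination_by students.length
decreasing_by all_goals simp

def rule_three (student_preferences : List (String × List String)) (room_capacities : List (String × Int)) : List (List (String × Bool)) :=
  let dict_list := (PySem.Dict.ofList room_capacities).items
  let students := (PySem.Dict.ofList student_preferences).keys
  dict_list.foldl (fun result i =>
    if i.2 < (students.length : Int) then
      let groups := group_combinations students (i.2 + 1)
      groups.foldl (fun result group =>
        let inner := group.foldl (fun inner person =>
          inner ++ [(PySem.Str.join "" [person, "_", i.1], false)]) []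
        result ++ [inner]) result
    else result) []

-- ===== PORT B =====
-- B's inner 'while rest: s, rest = rest[0], rest[1:]; new.append((combo + [s], rest))'
-- is this structural recursion over rest:
def extendState (combo : List String) (rest : List String) : List (List String × List String) :=
  match rest with
  | [] => []
  | s :: rest' => (combo ++ [s], rest') :: extendState combo rest'

def rule_three_alt (student_preferences : List (String × List String)) (room_capacities : List (String × Int)) : List (List (String × Bool)) :=
  let students := (PySem.Dict.ofList student_preferences).keys
  ((PySem.Dict.ofList room_capacities).items).foldl (fun result rm =>
    if 0 ≤ rm.2 ∧ rm.2 < (students.length : Int) then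
      let states := (List.range (rm.2 + 1).toNat).foldl
        (fun p _ => p.flatMap (fun cr => extendState cr.1 cr.2)) [([], students)]
      result ++ states.map (fun cr =>
        cr.1.map (fun name => (PySem.Str.join "" [name, "_", rm.1], false)))
    else result) []

-- ===== PRECONDITION & SPEC =====
def Spec_rule_three (student_preferences : List (String × List String)) (room_capacities : List (String × Int)) (out : List (List (String × Bool))) : Prop := out = rule_three_alt student_preferences room_capacities
instance (student_preferences : List (String × List String)) (room_capacities : List (String × Int)) (out : List (List (String × Bool))) : Decidable (Spec_rule_three student_preferences room_capacities out) := by unfold Spec_rule_three; infer_instance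

-- ===== CLAIM (what is proved, stated in full; the proofs are below) =====
def Claim_equal_rule_three : Prop := ∀ (student_preferences : List (String × List String)) (room_capacities : List (String × Int)), Dom_rule_three student_preferences room_capacities → Spec_rule_three student_preferences room_capacities (rule_three student_preferences room_capacities)

-- ===== LEMMAS AND PROOFS =====

-- proof-side normal form: combinations of size k in lexicographic order
def pyCombinations : Nat → List String → List (List String)
  | 0, _ => [[]]
  | _ + 1, [] => []
  | k + 1, x :: xs => (pyCombinations k xs).map (x :: ·) ++ pyCombinations (k + 1) xs

-- expanding one seed state through k rounds
def pvFrontier : Nat → List String → List String → List (List String × List String)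
  | 0, combo, rest => [(combo, rest)]
  | k + 1, combo, rest => (extendState combo rest).flatMap (fun cr => pvFrontier k cr.1 cr.2)

lemma gc_nonpos (xs : List String) : ∀ (g : Int), g ≤ 0 → group_combinations xs g = [] := by
  induction xs with
  | nil => intro g hg; rw [group_combinations]; simp [show ¬ g = 1 by omega]
  | cons x xs ih =>
    intro g hg
    rw [group_combinations]
    simp [show ¬ g = 1 by omega, ih g hg, ih (g - 1) (by omega)]

lemma combos_one (ys : List String) : pyCombinations 1 ys = ys.map (fun s => [s]) := by
  induction ys with
  | nil => rfl
  | cons y ys ih => simp [pyCombinations, ih]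

lemma gc_eq_combos (xs : List String) : ∀ (k : Nat),
    group_combinations xs ((k : Int) + 1) = pyCombinations (k + 1) xs := by
  induction xs with
  | nil =>
    intro k
    rw [group_combinations]
    cases k with
    | zero => simp [pyCombinations]
    | succ k => simp [pyCombinations, show ¬ ((k : Int) + 1 + 1 = 1) by omega]
  | cons x xs ih =>
    intro k
    rw [group_combinations]
    cases k with
    | zero =>
      rw [if_pos (by norm_num), PySem.List.foldl_append_singleton_eq_map, combos_one]
      simp
    | succ k =>
      rw [if_neg (by omega), show (((k + 1 : Nat) : Int) + 1 - 1) = (k : Int) + 1 by push_cast; ring,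
        ih k, ih (k + 1), PySem.List.foldl_append_singleton_eq_map]
      rfl

lemma gc_eq_combos' (xs : List String) (c : Int) (hc : 0 ≤ c) :
    group_combinations xs (c + 1) = pyCombinations (c + 1).toNat xs := by
  have h := gc_eq_combos xs c.toNat
  rw [show ((c.toNat : Int) + 1) = c + 1 by omega] at h
  rw [h, show (c + 1).toNat = c.toNat + 1 by omega]

lemma frontier_succ' : ∀ (k : Nat) (combo rest : List String),
    pvFrontier (k + 1) combo rest
      = (pvFrontier k combo rest).flatMap (fun cr => extendState cr.1 cr.2) := by
  intro k
  induction k with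
  | zero => intro combo rest; simp [pvFrontier]
  | succ k ih =>
    intro combo rest
    show (extendState combo rest).flatMap (fun cr => pvFrontier (k + 1) cr.1 cr.2) = _
    calc (extendState combo rest).flatMap (fun cr => pvFrontier (k + 1) cr.1 cr.2)
        = (extendState combo rest).flatMap
            (fun cr => (pvFrontier k cr.1 cr.2).flatMap (fun cr => extendState cr.1 cr.2)) := by
          simp only [ih]
      _ = ((extendState combo rest).flatMap (fun cr => pvFrontier k cr.1 cr.2)).flatMap
            (fun cr => extendState cr.1 cr.2) := by
          rw [List.flatMap_assoc]
      _ = _ := rfl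

lemma range_foldl_frontier (k : Nat) (combo rest : List String) :
    (List.range k).foldl (fun p _ => p.flatMap (fun cr => extendState cr.1 cr.2)) [(combo, rest)]
      = pvFrontier k combo rest := by
  induction k with
  | zero => simp [pvFrontier]
  | succ k ih =>
    rw [List.range_succ, List.foldl_append, ih, List.foldl_cons, List.foldl_nil,
      ← frontier_succ']

lemma frontier_map_fst : ∀ (k : Nat) (combo rest : List String),
    (pvFrontier k combo rest).map (·.1) = (pyCombinations k rest).map (combo ++ ·) := by
  intro k
  induction k with
  | zero => intro combo rest; simp [pvFrontier, pyCombinations]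
  | succ k ih =>
    intro combo rest
    induction rest with
    | nil => simp [pvFrontier, extendState, pyCombinations]
    | cons s r ihr =>
      show ((extendState combo (s :: r)).flatMap (fun cr => pvFrontier k cr.1 cr.2)).map (·.1) = _
      rw [extendState]
      rw [List.flatMap_cons, List.map_append, ih (combo ++ [s]) r]
      have hr : ((extendState combo r).flatMap (fun cr => pvFrontier k cr.1 cr.2)).map (·.1)
          = (pyCombinations (k + 1) r).map (combo ++ ·) := ihr
      rw [hr]
      show _ = ((pyCombinations k r).map (s :: ·) ++ pyCombinations (k + 1) r).map (combo ++ ·)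
      rw [List.map_append, List.map_map]
      congr 1
      apply List.map_congr_left
      intro c _
      simp

lemma main_foldl (students : List String) (items : List (String × Int)) :
    ∀ (acc : List (List (String × Bool))),
    items.foldl (fun result i =>
      if i.2 < (students.length : Int) then
        let groups := group_combinations students (i.2 + 1)
        groups.foldl (fun result group =>
          let inner := group.foldl (fun inner person =>
            inner ++ [(PySem.Str.join "" [person, "_", i.1], false)]) []
          result ++ [inner]) result
      else result) acc
    = items.foldl (fun result rm =>
        if 0 ≤ rm.2 ∧ rm.2 < (students.length : Int) then
          let states := (List.range (rm.2 + 1).toNat).foldl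
            (fun p _ => p.flatMap (fun cr => extendState cr.1 cr.2)) [([], students)]
          result ++ states.map (fun cr =>
            cr.1.map (fun name => (PySem.Str.join "" [name, "_", rm.1], false)))
        else result) acc := by
  induction items with
  | nil => intro acc; rfl
  | cons i items ih =>
    intro acc
    rw [List.foldl_cons, List.foldl_cons, ih]
    congr 1
    by_cases hlt : i.2 < (students.length : Int)
    · by_cases hnn : 0 ≤ i.2
      · rw [if_pos hlt, if_pos ⟨hnn, hlt⟩]
        show (group_combinations students (i.2 + 1)).foldl _ acc = _
        rw [gc_eq_combos' students i.2 hnn, PySem.List.foldl_append_singleton_eq_map]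
        congr 1
        show _ = ((List.range (i.2 + 1).toNat).foldl
            (fun p _ => p.flatMap (fun cr => extendState cr.1 cr.2)) [([], students)]).map _
        rw [range_foldl_frontier]
        have h := frontier_map_fst (i.2 + 1).toNat [] students
        simp only [List.nil_append] at h
        calc (pyCombinations (i.2 + 1).toNat students).map
              (fun group => group.foldl (fun inner person =>
                inner ++ [(PySem.Str.join "" [person, "_", i.1], false)]) [])
            = (pyCombinations (i.2 + 1).toNat students).map (fun group =>
                group.map (fun person => (PySem.Str.join "" [person, "_", i.1], false))) := by
              apply List.map_congr_left
              intro g _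
              rw [PySem.List.foldl_append_singleton_eq_map]
              simp
          _ = ((pvFrontier (i.2 + 1).toNat [] students).map (·.1)).map (fun group =>
                group.map (fun person => (PySem.Str.join "" [person, "_", i.1], false))) := by
              rw [h]; simp
          _ = _ := by rw [List.map_map]; rfl
      · rw [if_pos hlt, if_neg (by tauto)]
        show (group_combinations students (i.2 + 1)).foldl _ acc = _
        rw [gc_nonpos students (i.2 + 1) (by omega)]
        rfl
    · rw [if_neg hlt, if_neg (by tauto)]

-- ===== VERDICT (by name: the statement is the Claim_ definition above) =====
theorem rule_three_spec : Claim_equal_rule_three := by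
  intro sp rc _
  show rule_three sp rc = rule_three_alt sp rc
  unfold rule_three rule_three_alt
  exact main_foldl _ _ []
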